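-- pv_equiv track=rewrite | github.com/ThanwaSakdarat/OOD | w1q3.py | clearAllMinus
-- ===== SOURCE A (Python) =====
-- def clearAllMinus(list):
-- 	numberToRemove=[]
-- 	for i in range(len(list)):
-- 		if list[i]<1 or list[i]>20:
-- 			numberToRemove.append(list[i])
-- 	for i in numberToRemove:
-- 		list.remove(i)
-- 	return list
-- ===== SOURCE B (Python) =====
-- def clearAllMinus(list):
-- 	# one-pass in-place compaction with a write pointer, then truncate
-- 	w = 0
-- 	for x in list:
-- 		if 1 <= x <= 20:
-- 			list[w] = x
-- 			w += 1
-- 	del list[w:]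
-- 	return list
-- ===== Notes on version B (the rewrite author's own statement) =====
-- stated objective: faster
-- what changed: A collects out-of-range values and removes each by a linear list.remove scan (quadratic); B compacts the list in one pass with a write pointer and truncates once.
import Mathlib
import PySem

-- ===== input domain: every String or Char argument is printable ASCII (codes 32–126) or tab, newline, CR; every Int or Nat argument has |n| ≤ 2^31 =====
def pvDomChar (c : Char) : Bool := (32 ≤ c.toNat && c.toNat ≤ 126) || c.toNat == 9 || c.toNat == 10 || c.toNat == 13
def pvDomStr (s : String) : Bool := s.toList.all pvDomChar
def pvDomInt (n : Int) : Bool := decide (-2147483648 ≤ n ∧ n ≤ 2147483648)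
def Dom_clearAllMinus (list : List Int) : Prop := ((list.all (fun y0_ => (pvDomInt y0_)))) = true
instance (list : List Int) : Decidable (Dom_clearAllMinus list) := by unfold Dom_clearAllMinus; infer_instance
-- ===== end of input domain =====

-- B replaces A's collect-then-remove-by-value two-pass (quadratic) with a single-pass
-- write-pointer compaction (linear). A mutates its argument in place; equivalence proved
-- here is about the return value.

-- ===== PORT A =====
-- list.remove(i) never raises here (every collected value is still present when removed),
-- so the ValueError branch (remove? = none) is totalized with getD; it is never taken.
def clearAllMinus (list : List Int) : List Int :=
  let numberToRemove := (PySem.List.pyRange 0 (list.length : Int) 1).foldl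
      (fun acc i =>
        if PySem.List.pyGetD list i 0 < 1 ∨ PySem.List.pyGetD list i 0 > 20 then
          acc ++ [PySem.List.pyGetD list i 0]
        else acc) []
  numberToRemove.foldl (fun cur v => (PySem.List.remove? cur v).getD cur) list

-- ===== PORT B =====
-- The write-pointer prefix list[0:w] of kept elements is modeled as the accumulator;
-- 'del list[w:]' makes the kept prefix the whole result.
def clearAllMinus_alt (list : List Int) : List Int :=
  list.foldl (fun acc x => if 1 ≤ x ∧ x ≤ 20 then acc ++ [x] else acc) []

-- ===== PRECONDITION & SPEC =====
def Spec_clearAllMinus (list : List Int) (out : List Int) : Prop := out = clearAllMinus_alt list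
instance (list : List Int) (out : List Int) : Decidable (Spec_clearAllMinus list out) := by unfold Spec_clearAllMinus; infer_instance

-- ===== CLAIM (what is proved, stated in full; the proofs are below) =====
def Claim_equal_clearAllMinus : Prop := ∀ (list : List Int), Dom_clearAllMinus list → Spec_clearAllMinus list (clearAllMinus list)

-- ===== LEMMAS AND PROOFS =====

theorem rem_fold (vs : List Int) (x : Int) (xs : List Int) (h : ∀ v ∈ vs, v ≠ x) :
    vs.foldl (fun cur v => (PySem.List.remove? cur v).getD cur) (x :: xs)
      = x :: vs.foldl (fun cur v => (PySem.List.remove? cur v).getD cur) xs := by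
  induction vs generalizing xs with
  | nil => rfl
  | cons v vs ih =>
    have hv : v ≠ x := h v (by simp)
    have hx : x ≠ v := fun e => hv e.symm
    simp only [List.foldl_cons, PySem.List.remove?_cons_of_ne xs hx]
    cases PySem.List.remove? xs v with
    | none => simp [ih _ (fun u hu => h u (by simp [hu]))]
    | some r => simp [ih _ (fun u hu => h u (by simp [hu]))]

theorem fold_remove_filter (xs : List Int) :
    (xs.filter (fun x => decide (x < 1 ∨ x > 20))).foldl
        (fun cur v => (PySem.List.remove? cur v).getD cur) xs
      = xs.filter (fun x => decide (1 ≤ x ∧ x ≤ 20)) := by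
  induction xs with
  | nil => rfl
  | cons x xs ih =>
    by_cases hk : 1 ≤ x ∧ x ≤ 20
    · have hb : ¬ (x < 1 ∨ x > 20) := by omega
      rw [List.filter_cons_of_neg (by simpa using hb),
          List.filter_cons_of_pos (by simpa using hk)]
      rw [rem_fold _ x xs (by
        intro v hv
        have := List.of_mem_filter hv
        simp at this
        omega)]
      rw [ih]
    · have hb : x < 1 ∨ x > 20 := by omega
      rw [List.filter_cons_of_pos (by simpa using hb),
          List.filter_cons_of_neg (by simpa using hk)]
      simp only [List.foldl_cons, PySem.List.remove?_cons_self, Option.getD_some]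
      exact ih

-- ===== VERDICT (by name: the statement is the Claim_ definition above) =====
theorem clearAllMinus_spec : Claim_equal_clearAllMinus := by
  intro l _
  unfold Spec_clearAllMinus clearAllMinus clearAllMinus_alt
  simp only []
  rw [PySem.List.foldl_pyRange_zero_pyGetD' l 0
        (fun acc x => if x < 1 ∨ x > 20 then acc ++ [x] else acc) ([] : List Int)]
  rw [PySem.List.foldl_append_ite_eq_filter, PySem.List.foldl_append_ite_eq_filter]
  simpa using fold_remove_filter l
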